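-- pv_equiv track=rewrite | github.com/Juli4ca/Python | 5_2.py | array_list
-- ===== SOURCE A (Python) =====
-- def array_list(list_number: list):
--     list_total = []
--     for i in range(len(list_number)):
--         value = list_number[i]
--         list_help = [value]
--         value = list_number[i]
--         for j in range((i + 1), (len(list_number))):
--             if list_number[j] > value:
--                 value = list_number[j]
--                 list_help.append(value)
--         if len(list_help) > 1:
--             list_total.append(list_help)
--     return list_total
-- ===== SOURCE B (Python) =====
-- def array_list(list_number):
--     # One right-to-left pass: a stack of record chains (strictly increasing
--     # head values from top to bottom); chain for i = [v] + chain of the next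
--     # strictly greater element to the right.
--     stack = []
--     chains = []
--     for i in range(len(list_number) - 1, -1, -1):
--         v = list_number[i]
--         while stack and stack[-1][0] <= v:
--             stack.pop()
--         chain = [v] + (stack[-1] if stack else [])
--         stack.append(chain)
--         chains.append(chain)
--     chains.reverse()
--     return [c for c in chains if len(c) > 1]
-- ===== Notes on version B (the rewrite author's own statement) =====
-- stated objective: alternative
-- what changed: Replaces A's per-index quadratic rescan of the suffix by a single right-to-left pass with a monotonic stack of record chains, each chain built as [v] + chain of the next strictly greater element to the right.
import Mathlib
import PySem

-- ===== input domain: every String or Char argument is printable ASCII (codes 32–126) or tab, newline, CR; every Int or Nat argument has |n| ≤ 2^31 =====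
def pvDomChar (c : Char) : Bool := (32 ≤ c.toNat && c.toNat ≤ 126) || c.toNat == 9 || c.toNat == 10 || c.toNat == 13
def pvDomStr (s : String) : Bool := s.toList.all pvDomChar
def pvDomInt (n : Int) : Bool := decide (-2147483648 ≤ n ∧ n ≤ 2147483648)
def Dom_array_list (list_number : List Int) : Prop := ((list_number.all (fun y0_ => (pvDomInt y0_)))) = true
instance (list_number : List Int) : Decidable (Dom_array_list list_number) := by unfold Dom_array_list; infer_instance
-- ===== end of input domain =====

-- B replaces A's per-index rescans by one right-to-left pass with a monotonic
-- stack of record chains (objective: alternative algorithm).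

-- ===== PORT A =====
-- literal transliteration: outer loop over i, inner loop over j rebuilding the
-- running-maximum record list from scratch for every i
def array_list (list_number : List Int) : List (List Int) :=
  (PySem.List.pyRange 0 list_number.length 1).foldl (fun list_total i =>
    let value := PySem.List.pyGetD list_number i 0
    let r := (PySem.List.pyRange (i + 1) list_number.length 1).foldl
      (fun (s : Int × List Int) j =>
        if PySem.List.pyGetD list_number j 0 > s.1 then
          (PySem.List.pyGetD list_number j 0, s.2 ++ [PySem.List.pyGetD list_number j 0])
        else s)
      (value, [value])
    if r.2.length > 1 then list_total ++ [r.2] else list_total) []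

-- ===== PORT B =====
-- the 'while stack and stack[-1][0] <= v: stack.pop()' loop of Source B
def popLE (v : Int) : List (List Int) → List (List Int)
  | [] => []
  | c :: rest => if c.headD 0 ≤ v then popLE v rest else c :: rest

-- Source B's right-to-left pass (structural recursion = processing the list from
-- the right); returns (stack, chains-in-original-order)
def altGo : List Int → List (List Int) × List (List Int)
  | [] => ([], [])
  | v :: rest =>
    let p := altGo rest
    let s := popLE v p.1
    let c := v :: s.headD []
    (c :: s, c :: p.2)

def array_list_alt (list_number : List Int) : List (List Int) :=
  (altGo list_number).2.filter (fun c => decide (c.length > 1))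

-- ===== PRECONDITION & SPEC =====
def Spec_array_list (list_number : List Int) (out : List (List Int)) : Prop := out = array_list_alt list_number
instance (list_number : List Int) (out : List (List Int)) : Decidable (Spec_array_list list_number out) := by unfold Spec_array_list; infer_instance

-- ===== CLAIM (what is proved, stated in full; the proofs are below) =====
def Claim_equal_array_list : Prop := ∀ (list_number : List Int), Dom_array_list list_number → Spec_array_list list_number (array_list list_number)

-- ===== LEMMAS AND PROOFS =====

-- the running-maximum record sequence of l continued from current max v
def recs (v : Int) : List Int → List Int
  | [] => []
  | x :: xs => if x > v then x :: recs x xs else recs v xs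

-- the per-start-index record chains, in order
def chainsOf : List Int → List (List Int)
  | [] => []
  | v :: rest => (v :: recs v rest) :: chainsOf rest

theorem popLE_popLE (x v : Int) (hxv : x ≤ v) :
    ∀ s : List (List Int), popLE v (popLE x s) = popLE v s := by
  intro s
  induction s with
  | nil => rfl
  | cons c rest ih =>
    by_cases h : c.headD 0 ≤ x
    · show popLE v (if c.headD 0 ≤ x then popLE x rest else c :: rest)
        = if c.headD 0 ≤ v then popLE v rest else c :: rest
      rw [if_pos h, if_pos (le_trans h hxv), ih]
    · show popLE v (if c.headD 0 ≤ x then popLE x rest else c :: rest)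
        = if c.headD 0 ≤ v then popLE v rest else c :: rest
      rw [if_neg h, popLE]

theorem recs_popLE : ∀ (l : List Int) (v : Int),
    recs v l = (popLE v (altGo l).1).headD [] := by
  intro l
  induction l with
  | nil => intro v; rfl
  | cons x rest ih =>
    intro v
    by_cases h : x > v
    · simp only [altGo, recs, h, if_pos]
      rw [show popLE v ((x :: (popLE x (altGo rest).1).headD []) :: popLE x (altGo rest).1)
            = (x :: (popLE x (altGo rest).1).headD []) :: popLE x (altGo rest).1 by
          simp [popLE, not_le.mpr h]]
      simp [ih x]
    · have hle : x ≤ v := not_lt.mp h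
      simp only [altGo, recs, h, if_false]
      rw [show popLE v ((x :: (popLE x (altGo rest).1).headD []) :: popLE x (altGo rest).1)
            = popLE v (popLE x (altGo rest).1) by simp [popLE, hle]]
      rw [popLE_popLE x v hle, ih v]

theorem altGo_snd : ∀ l : List Int, (altGo l).2 = chainsOf l := by
  intro l
  induction l with
  | nil => rfl
  | cons v rest ih =>
    simp only [altGo, chainsOf]
    rw [← recs_popLE rest v, ih]

theorem alt_eq (l : List Int) :
    array_list_alt l = (chainsOf l).filter (fun c => decide (c.length > 1)) := by
  unfold array_list_alt
  rw [altGo_snd]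

-- A's inner loop computes (running max, h ++ records)
theorem inner_fold (l : List Int) : ∀ (v : Int) (h : List Int),
    l.foldl (fun (s : Int × List Int) x => if x > s.1 then (x, s.2 ++ [x]) else s) (v, h)
      = (l.foldl (fun a x => if x > a then x else a) v, h ++ recs v l) := by
  induction l with
  | nil => intro v h; simp [recs]
  | cons x xs ih =>
    intro v h
    by_cases hx : x > v
    · simp only [List.foldl, hx, if_pos, recs]
      rw [ih x (h ++ [x])]
      simp
    · simp only [List.foldl, hx, if_false, recs]
      exact ih v h

-- A's outer loop from index i equals the filtered chains of the suffix
theorem outer_fold (a : List Int) : ∀ (n : Nat) (i : Nat) (acc : List (List Int)),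
    a.length - i ≤ n →
    (PySem.List.pyRange (i : Int) a.length 1).foldl (fun list_total ii =>
        let value := PySem.List.pyGetD a ii 0
        let r := (PySem.List.pyRange (ii + 1) a.length 1).foldl
          (fun (s : Int × List Int) j =>
            if PySem.List.pyGetD a j 0 > s.1 then
              (PySem.List.pyGetD a j 0, s.2 ++ [PySem.List.pyGetD a j 0])
            else s)
          (value, [value])
        if r.2.length > 1 then list_total ++ [r.2] else list_total) acc
      = acc ++ (chainsOf (a.drop i)).filter (fun c => decide (c.length > 1)) := by
  intro n
  induction n with
  | zero =>
    intro i acc hn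
    have hi : a.length ≤ i := by omega
    rw [PySem.List.pyRange_one_eq_nil (by exact_mod_cast hi)]
    rw [List.drop_eq_nil_of_le hi]
    simp [chainsOf]
  | succ n ih =>
    intro i acc hn
    by_cases hi : i < a.length
    · rw [PySem.List.pyRange_one_cons (by exact_mod_cast hi)]
      rw [List.foldl_cons]
      have hget : PySem.List.pyGetD a (i : Int) 0 = a[i] := by
        simp [List.getD_eq_getElem?_getD, List.getElem?_eq_getElem hi]
      have hdrop : a.drop i = a[i] :: a.drop (i + 1) :=
        List.drop_eq_getElem_cons hi
      have hcast : ((i : Int) + 1) = ((i + 1 : Nat) : Int) := by push_cast; ring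
      have hinner := PySem.List.foldl_pyRange_pyGetD' a 0
        (fun (s : Int × List Int) x => if x > s.1 then (x, s.2 ++ [x]) else s)
        (a[i], [a[i]]) (show (0 : Int) ≤ (i : Int) + 1 by positivity)
      have htoNat : ((i : Int) + 1).toNat = i + 1 := by omega
      rw [htoNat] at hinner
      simp only [hget]
      rw [hinner, inner_fold]
      rw [hcast, ih (i + 1) _ (by omega)]
      rw [hdrop]
      simp only [chainsOf, List.filter_cons]
      rcases recs a[i] (a.drop (i + 1)) with _ | ⟨y, ys⟩
      · simp
      · simp
    · have h1 : a.length ≤ i := by omega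
      rw [PySem.List.pyRange_one_eq_nil (by exact_mod_cast h1)]
      rw [List.drop_eq_nil_of_le h1]
      simp [chainsOf]

-- ===== VERDICT (by name: the statement is the Claim_ definition above) =====
theorem array_list_spec : Claim_equal_array_list := by
  intro l _
  unfold Spec_array_list
  rw [alt_eq]
  unfold array_list
  have := outer_fold l l.length 0 [] (by omega)
  simpa using this
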